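-- pv_equiv track=rewrite | github.com/eternalyangyi/Algorithm | LogarithmicMerge.py | Logarithmic_merge
-- ===== SOURCE A (Python) =====
-- def lmat(l,z0):
--     for i in range(len(l) + 1):
--         if (i == len(l)):
--             l.append([])
--         if (l[i] != []):
--             temp = l[i]
--             temp.extend(z0)
--             z0 = temp
--             l[i] = []
--         else:
--             l[i] = sorted(z0)
--             break
--     return l
--
-- def Logarithmic_merge(index, cut_off, buffer_size):
--     z0 = []
--     L = [[]]
--     result = []
--     count = 0
--     while count < cut_off:
--         token = index[count]
--         z0.append(token)
--         if(len(z0) == buffer_size):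
--             L= lmat(L,z0)
--             z0 = []
--         count += 1;
--     return [z0] + L
-- ===== SOURCE B (Python) =====
-- def Logarithmic_merge(index, cut_off, buffer_size):
--     # Closed-form binary-counter reconstruction: with m full buffers merged,
--     # level j is nonempty iff bit j of m is set and then holds sorted() of the
--     # contiguous chunk of 2**j buffers allocated high-bit-first.
--     n = max(cut_off, 0)
--     m = n // buffer_size if buffer_size > 0 else 0
--     nlev = max(1, m.bit_length())
--     levels = [[] for _ in range(nlev)]
--     pos = 0
--     for j in range(nlev - 1, -1, -1):
--         if (m >> j) & 1:
--             size = (1 << j) * buffer_size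
--             levels[j] = sorted(index[pos:pos + size])
--             pos += size
--     return [list(index[pos:n])] + levels
-- ===== Notes on version B (the rewrite author's own statement) =====
-- stated objective: faster
-- what changed: B replaces A's token-by-token simulation with repeated carry-merges (each re-sorting the concatenated levels) by a closed-form binary-counter reconstruction: it computes the number m of full buffers, and for each set bit j of m sorts the corresponding contiguous chunk of the input exactly once.
-- crash fix: A raises IndexError whenever cut_off > len(index); B clamps slices to the list and returns the merge of the available tokens (e.g. [[],[]] on ([],1,1)). — e.g. on Logarithmic_merge([], 1, 1): A raises IndexError, B returns [[], []]
import Mathlib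
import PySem

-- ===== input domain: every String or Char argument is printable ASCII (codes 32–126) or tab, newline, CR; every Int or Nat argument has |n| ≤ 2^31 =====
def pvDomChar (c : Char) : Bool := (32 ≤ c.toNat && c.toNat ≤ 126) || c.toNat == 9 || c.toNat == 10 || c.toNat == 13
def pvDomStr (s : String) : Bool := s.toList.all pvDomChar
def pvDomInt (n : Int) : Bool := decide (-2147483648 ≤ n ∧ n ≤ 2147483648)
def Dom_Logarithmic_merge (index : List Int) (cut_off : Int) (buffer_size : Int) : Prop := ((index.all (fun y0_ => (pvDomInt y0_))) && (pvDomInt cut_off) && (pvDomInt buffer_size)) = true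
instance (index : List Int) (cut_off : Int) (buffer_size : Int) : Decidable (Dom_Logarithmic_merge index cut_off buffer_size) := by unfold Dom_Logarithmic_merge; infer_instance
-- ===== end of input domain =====

-- B replaces A's token-by-token simulation of carry merges by a closed-form
-- binary-counter reconstruction that sorts each final level's chunk once
-- (measured faster on large inputs).

-- ===== PORT A =====
-- for i in range(len(l)+1): append [] at the end; full level -> carry into z0; empty level -> place sorted(z0), break
def lmat : List (List Int) → List Int → List (List Int)
  | [], z0 => [PySem.List.sorted z0 (fun x => x)]
  | x :: rest, z0 =>
    if x ≠ [] then [] :: lmat rest (x ++ z0)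
    else PySem.List.sorted z0 (fun x => x) :: rest



-- while count < cut_off: fuel = remaining iterations; index[count] raises IndexError outside Pre_, where getD 0 is arbitrary
def lmGo (index : List Int) (buffer_size : Int) : Nat → Int → List Int → List (List Int) → List Int × List (List Int)
  | 0, _, z0, L => (z0, L)
  | fuel+1, count, z0, L =>
    let token := (PySem.List.pyGet? index count).getD 0
    let z1 := z0 ++ [token]
    if (z1.length : Int) = buffer_size then
      lmGo index buffer_size fuel (count + 1) [] (lmat L z1)
    else
      lmGo index buffer_size fuel (count + 1) z1 L

def Logarithmic_merge (index : List Int) (cut_off : Int) (buffer_size : Int) : List (List Int) :=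
  let r := lmGo index buffer_size cut_off.toNat 0 [] [[]]
  r.1 :: r.2


-- ===== PORT B =====
-- for j in range(nlev-1,-1,-1): set bit j of m -> level j gets sorted(index[pos:pos+size]); returns (levels[0..len-1], final pos)
def lmBuild (index : List Int) (bs : Int) (m : Nat) : Nat → Int → List (List Int) × Int
  | 0, pos => ([], pos)
  | j+1, pos =>
    if (m >>> j) &&& 1 = 1 then
      let size : Int := 2 ^ j * bs
      let lev := PySem.List.sorted (PySem.List.slice index (some pos) (some (pos + size))) (fun x => x)
      let r := lmBuild index bs m j (pos + size)
      (r.1 ++ [lev], r.2)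
    else
      let r := lmBuild index bs m j pos
      (r.1 ++ [[]], r.2)

def Logarithmic_merge_alt (index : List Int) (cut_off : Int) (buffer_size : Int) : List (List Int) :=
  let n := max cut_off 0
  let m : Nat := if 0 < buffer_size then (PySem.Int.floordiv n buffer_size).toNat else 0
  let nlev := max 1 (Nat.size m)
  let r := lmBuild index buffer_size m nlev 0
  PySem.List.slice index (some r.2) (some n) :: r.1


-- ===== PRECONDITION & SPEC =====
-- A raises IndexError as soon as count reaches len(index); Pre_ keeps cut_off within the list.
def Pre_Logarithmic_merge (index : List Int) (cut_off : Int) (buffer_size : Int) : Prop :=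
  cut_off ≤ (index.length : Int)
instance (index : List Int) (cut_off : Int) (buffer_size : Int) : Decidable (Pre_Logarithmic_merge index cut_off buffer_size) := by unfold Pre_Logarithmic_merge; infer_instance

def pvWitness_Logarithmic_merge : List Int × Int × Int := ([3, 1, 2], 3, 1)

-- A raises IndexError whenever cut_off > len(index); B simply stops at the end of the list and returns normally.
def Raises_Logarithmic_merge (index : List Int) (cut_off : Int) (buffer_size : Int) : Prop :=
  (index.length : Int) < cut_off
instance (index : List Int) (cut_off : Int) (buffer_size : Int) : Decidable (Raises_Logarithmic_merge index cut_off buffer_size) := by unfold Raises_Logarithmic_merge; infer_instance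
def pvRaiseWitness_Logarithmic_merge : List Int × Int × Int := ([], 1, 1)
def pvRaiseWitnessOut_Logarithmic_merge : List (List Int) := [[], []]

def Spec_Logarithmic_merge (index : List Int) (cut_off : Int) (buffer_size : Int) (out : List (List Int)) : Prop := out = Logarithmic_merge_alt index cut_off buffer_size
instance (index : List Int) (cut_off : Int) (buffer_size : Int) (out : List (List Int)) : Decidable (Spec_Logarithmic_merge index cut_off buffer_size out) := by unfold Spec_Logarithmic_merge; infer_instance

-- ===== CLAIM (what is proved, stated in full; the proofs are below) =====
def Claim_equal_Logarithmic_merge : Prop := ∀ (index : List Int) (cut_off : Int) (buffer_size : Int), Dom_Logarithmic_merge index cut_off buffer_size → Pre_Logarithmic_merge index cut_off buffer_size → Spec_Logarithmic_merge index cut_off buffer_size (Logarithmic_merge index cut_off buffer_size)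
def Claim_raises_Logarithmic_merge : Prop := (∀ (index : List Int) (cut_off : Int) (buffer_size : Int), Dom_Logarithmic_merge index cut_off buffer_size → Raises_Logarithmic_merge index cut_off buffer_size → ¬ Pre_Logarithmic_merge index cut_off buffer_size) ∧ (Dom_Logarithmic_merge (pvRaiseWitness_Logarithmic_merge.1) (pvRaiseWitness_Logarithmic_merge.2.1) (pvRaiseWitness_Logarithmic_merge.2.2) ∧ Raises_Logarithmic_merge (pvRaiseWitness_Logarithmic_merge.1) (pvRaiseWitness_Logarithmic_merge.2.1) (pvRaiseWitness_Logarithmic_merge.2.2) ∧ Logarithmic_merge_alt (pvRaiseWitness_Logarithmic_merge.1) (pvRaiseWitness_Logarithmic_merge.2.1) (pvRaiseWitness_Logarithmic_merge.2.2) = pvRaiseWitnessOut_Logarithmic_merge)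

-- ===== LEMMAS AND PROOFS =====
-- closed-form description of A's level list: level j after k merged buffers
def lev (b : Nat) (index : List Int) (k j : Nat) : List Int :=
  if k / 2 ^ j % 2 = 1 then
    PySem.List.sorted ((index.drop ((k / 2 ^ (j+1)) * 2 ^ (j+1) * b)).take (2 ^ j * b)) (fun x => x)
  else []

def levelsFrom (b : Nat) (index : List Int) (k : Nat) : Nat → Nat → List (List Int)
  | _, 0 => []
  | j, len+1 => lev b index k j :: levelsFrom b index k (j+1) len


theorem pv_ones_mod (k t : Nat) (ht0 : ∀ i < t, k / 2 ^ i % 2 = 1) :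
    k % 2 ^ t = 2 ^ t - 1 := by
  induction t with
  | zero => simp [Nat.mod_one]
  | succ t ih =>
    have h1 : k % 2 ^ t = 2 ^ t - 1 := ih (fun i hi => ht0 i (by omega))
    have h2 : k % (2 ^ t * 2) = k % 2 ^ t + 2 ^ t * (k / 2 ^ t % 2) := Nat.mod_mul
    have h3 : k / 2 ^ t % 2 = 1 := ht0 t (by omega)
    have hp : 0 < 2 ^ t := Nat.two_pow_pos t
    rw [pow_succ]
    rw [h3, mul_one] at h2
    omega

theorem pv_carry_eq (k t : Nat) (h1 : k % 2 ^ t = 2 ^ t - 1) :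
    k + 1 = (k / 2 ^ t + 1) * 2 ^ t := by
  have h := Nat.div_add_mod k (2 ^ t)
  have hp : 0 < 2 ^ t := Nat.two_pow_pos t
  have h2 : k + 1 = 2 ^ t * (k / 2 ^ t) + 2 ^ t := by omega
  rw [h2]; ring

-- (k+1)/2^j = k/2^j + 1 for j ≤ t (low bits of k all ones)
theorem pv_succ_div_low (k t j : Nat) (ht0 : ∀ i < t, k / 2 ^ i % 2 = 1) (hj : j ≤ t) :
    (k + 1) / 2 ^ j = k / 2 ^ j + 1 := by
  have h1 := pv_ones_mod k t ht0
  have hdvd : 2 ^ j ∣ k + 1 := by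
    rw [pv_carry_eq k t h1]
    exact Dvd.dvd.mul_left (pow_dvd_pow 2 hj) _
  rw [Nat.succ_div, if_pos hdvd]

-- (k+1)/2^i = k/2^i for i > t where bit t of k is 0
theorem pv_succ_div_high (k t i : Nat) (ht0 : ∀ j < t, k / 2 ^ j % 2 = 1)
    (ht1 : k / 2 ^ t % 2 = 0) (hi : t < i) :
    (k + 1) / 2 ^ i = k / 2 ^ i := by
  have h1 := pv_ones_mod k t ht0
  have hp : 0 < 2 ^ t := Nat.two_pow_pos t
  have hpi : 0 < 2 ^ i := Nat.two_pow_pos i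
  have hsplit : k % 2 ^ i = k % 2 ^ t + 2 ^ t * (k / 2 ^ t % 2 ^ (i - t)) := by
    have h : (2:Nat) ^ i = 2 ^ t * 2 ^ (i - t) := by
      rw [← pow_add]; congr 1; omega
    rw [h, Nat.mod_mul]
  have heven : k / 2 ^ t % 2 ^ (i - t) % 2 = 0 := by
    have h2 : (2:Nat) ^ (i - t) = 2 * 2 ^ (i - t - 1) := by
      rw [← pow_succ']; congr 1; omega
    rw [h2, Nat.mod_mod_of_dvd _ ⟨2 ^ (i - t - 1), rfl⟩]
    exact ht1
  have hlt : k / 2 ^ t % 2 ^ (i - t) < 2 ^ (i - t) := Nat.mod_lt _ (Nat.two_pow_pos _)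
  have hgap : 2 ^ (i - t) % 2 = 0 := by
    have h2 : (2:Nat) ^ (i - t) = 2 * 2 ^ (i - t - 1) := by
      rw [← pow_succ']; congr 1; omega
    omega
  have hE : k / 2 ^ t % 2 ^ (i - t) ≤ 2 ^ (i - t) - 2 := by omega
  have hmul : 2 ^ t * (k / 2 ^ t % 2 ^ (i - t)) ≤ 2 ^ t * (2 ^ (i - t) - 2) :=
    Nat.mul_le_mul_left _ hE
  have hpow : 2 ^ t * 2 ^ (i - t) = 2 ^ i := by rw [← pow_add]; congr 1; omega
  have hmul2 : 2 ^ t * (2 ^ (i - t) - 2) = 2 ^ i - 2 * 2 ^ t := by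
    rw [Nat.mul_sub]; omega
  have hcomb : 2 ^ t * (k / 2 ^ t % 2 ^ (i - t)) ≤ 2 ^ i - 2 * 2 ^ t :=
    le_trans hmul (le_of_eq hmul2)
  have h2ti : 2 * 2 ^ t ≤ 2 ^ i := by
    calc 2 * 2 ^ t = 2 ^ t * 2 := by ring
    _ ≤ 2 ^ t * 2 ^ (i - t) := Nat.mul_le_mul_left _ (by
        have : (2:Nat) ^ 1 ≤ 2 ^ (i - t) := Nat.pow_le_pow_right (by norm_num) (by omega)
        simpa using this)
    _ = 2 ^ i := hpow
  obtain ⟨A, hA⟩ : ∃ A, A = 2 ^ t * (k / 2 ^ t % 2 ^ (i - t)) := ⟨_, rfl⟩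
  rw [← hA] at hsplit hcomb
  have hrbound : k % 2 ^ i + 1 < 2 ^ i := by omega
  have hrec : k + 1 = 2 ^ i * (k / 2 ^ i) + (k % 2 ^ i + 1) := by
    have := Nat.div_add_mod k (2 ^ i); omega
  rw [hrec, Nat.mul_add_div hpi, Nat.div_eq_of_lt hrbound]
  omega

theorem pv_start_bit1 (k j : Nat) (hb : k / 2 ^ j % 2 = 1) :
    k / 2 ^ j * 2 ^ j = k / 2 ^ (j+1) * 2 ^ (j+1) + 2 ^ j := by
  have hd : k / 2 ^ (j+1) = k / 2 ^ j / 2 := by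
    rw [pow_succ, ← Nat.div_div_eq_div_mul]
  have h2 : k / 2 ^ j = 2 * (k / 2 ^ j / 2) + 1 := by omega
  rw [hd, pow_succ]
  calc k / 2 ^ j * 2 ^ j = (2 * (k / 2 ^ j / 2) + 1) * 2 ^ j := by rw [← h2]
  _ = k / 2 ^ j / 2 * (2 ^ j * 2) + 2 ^ j := by ring

theorem pv_start_bit0 (k j : Nat) (hb : k / 2 ^ j % 2 = 0) :
    k / 2 ^ j * 2 ^ j = k / 2 ^ (j+1) * 2 ^ (j+1) := by
  have hd : k / 2 ^ (j+1) = k / 2 ^ j / 2 := by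
    rw [pow_succ, ← Nat.div_div_eq_div_mul]
  have h2 : k / 2 ^ j = 2 * (k / 2 ^ j / 2) := by omega
  rw [hd, pow_succ]
  calc k / 2 ^ j * 2 ^ j = 2 * (k / 2 ^ j / 2) * 2 ^ j := by rw [← h2]
  _ = k / 2 ^ j / 2 * (2 ^ j * 2) := by ring

theorem pv_size_carry (k t : Nat) (ht0 : ∀ i < t, k / 2 ^ i % 2 = 1)
    (ht1 : k / 2 ^ t % 2 = 0) :
    max (max 1 (Nat.size k)) (t + 1) = max 1 (Nat.size (k + 1)) := by
  have hones := pv_ones_mod k t ht0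
  have hp : 0 < 2 ^ t := Nat.two_pow_pos t
  have h2t : 2 ^ t ≤ k + 1 := by
    have hce := pv_carry_eq k t hones
    have hq1 : 0 < k / 2 ^ t + 1 := Nat.succ_pos _
    have h1 : 2 ^ t ≤ (k / 2 ^ t + 1) * 2 ^ t := Nat.le_mul_of_pos_left _ hq1
    obtain ⟨C, hC⟩ : ∃ C, C = (k / 2 ^ t + 1) * 2 ^ t := ⟨_, rfl⟩
    rw [← hC] at hce h1
    omega
  have htlt : t < Nat.size (k + 1) := Nat.lt_size.2 h2t
  have hmono : Nat.size k ≤ Nat.size (k + 1) := Nat.size_le_size (by omega)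
  have hklt : k < 2 ^ Nat.size k := Nat.lt_size_self k
  apply Nat.le_antisymm
  · -- both components ≤ max 1 (size (k+1))
    have : Nat.size k ≤ max 1 (Nat.size (k + 1)) := le_trans hmono (le_max_right _ _)
    omega
  · -- size (k+1) ≤ LHS
    have hS : Nat.size (k + 1) ≤ max (max 1 (Nat.size k)) (t + 1) := by
      by_cases hc : k + 1 < 2 ^ Nat.size k
      · have : Nat.size (k + 1) ≤ Nat.size k := Nat.size_le.2 hc
        omega
      · -- k + 1 = 2 ^ size k; then t ≥ size k
        have hkeq : k + 1 = 2 ^ Nat.size k := by omega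
        have hts : Nat.size k ≤ t := by
          by_contra hlt
          push Not at hlt
          -- t < size k; show bit t of k = 1, contradicting ht1
          have hdm := Nat.div_add_mod k (2 ^ t)
          have hsplitpow : 2 ^ Nat.size k = 2 ^ t * 2 ^ (Nat.size k - t) := by
            rw [← pow_add]; congr 1; omega
          have hql : 2 ^ t * (k / 2 ^ t) = 2 ^ t * (2 ^ (Nat.size k - t) - 1) := by
            rw [Nat.mul_sub, ← hsplitpow]
            obtain ⟨X, hX⟩ : ∃ X, X = 2 ^ t * (k / 2 ^ t) := ⟨_, rfl⟩
            rw [← hX] at hdm ⊢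
            omega
          have hq : k / 2 ^ t = 2 ^ (Nat.size k - t) - 1 :=
            Nat.eq_of_mul_eq_mul_left hp hql
          have hpos : (2:Nat) ^ (Nat.size k - t) = 2 * 2 ^ (Nat.size k - t - 1) := by
            rw [← pow_succ']; congr 1; omega
          rw [hq, hpos] at ht1
          have hy : 0 < 2 ^ (Nat.size k - t - 1) := Nat.two_pow_pos _
          omega
        have hfin : k + 1 < 2 ^ (t + 1) := by
          calc k + 1 = 2 ^ Nat.size k := hkeq
          _ < 2 ^ (t + 1) := Nat.pow_lt_pow_right (by norm_num) (by omega)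
        have : Nat.size (k + 1) ≤ t + 1 := Nat.size_le.2 hfin
        omega
    omega

theorem pv_take_snoc (l : List Int) (s r : Nat) (h : s + r < l.length) :
    (l.drop s).take r ++ [(l[s+r]?).getD 0] = (l.drop s).take (r+1) := by
  rw [List.take_add_one]
  congr 1
  have h1 : (l.drop s)[r]? = l[s+r]? := by
    rw [List.getElem?_drop]
  rw [h1]
  have h2 : l[s+r]? = some l[s+r] := List.getElem?_eq_getElem h
  rw [h2]
  rfl

theorem pv_seg_split (l : List Int) (b a m e : Nat) (h1 : a ≤ m) (h2 : m ≤ e) :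
    (l.drop (a*b)).take ((e-a)*b) = (l.drop (a*b)).take ((m-a)*b) ++ (l.drop (m*b)).take ((e-m)*b) := by
  have harith : (e-a)*b = (m-a)*b + (e-m)*b := by
    rw [← Nat.add_mul]; congr 1; omega
  rw [harith, List.take_add]
  have hdd : (l.drop (a*b)).drop ((m-a)*b) = l.drop (m*b) := by
    rw [List.drop_drop]
    have h4 : a*b + (m-a)*b = m*b := by
      rw [← Nat.add_mul]
      have h5 : a + (m - a) = m := by omega
      rw [h5]
    rw [h4]
  rw [hdd]

theorem pv_seg_ne_nil (l : List Int) (b a e : Nat) (hb : 0 < b) (hae : a < e)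
    (hlen : e * b ≤ l.length) :
    (l.drop (a*b)).take ((e-a)*b) ≠ [] := by
  intro hnil
  have hl := congrArg List.length hnil
  simp only [List.length_take, List.length_drop, List.length_nil] at hl
  have hab : a * b + b ≤ e * b := by
    have h6 : (a+1) * b ≤ e * b := Nat.mul_le_mul_right _ (by omega)
    have h7 : (a+1) * b = a * b + b := by ring
    omega
  have hea : 0 < (e - a) * b := Nat.mul_pos (by omega) hb
  omega

theorem pv_sorted_congr (z w : List Int) (h : z.Perm w) :
    PySem.List.sorted z (fun x => x) = PySem.List.sorted w (fun x => x) :=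
  PySem.List.sorted_eq_sorted_of_perm z w (fun x => x) (fun _ _ h => h) h

theorem pv_sorted_ne_nil (z : List Int) (h : z ≠ []) :
    PySem.List.sorted z (fun x => x) ≠ [] := by
  intro hn
  exact h ((PySem.List.sorted_eq_nil_iff z (fun x => x) false).1 hn)

theorem levelsFrom_snoc (b : Nat) (index : List Int) (k : Nat) (len j : Nat) :
    levelsFrom b index k j (len+1) = levelsFrom b index k j len ++ [lev b index k (j+len)] := by
  induction len generalizing j with
  | zero => simp [levelsFrom]
  | succ n ih =>
    rw [levelsFrom, ih (j+1), levelsFrom]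
    have hjn : j+1+n = j+(n+1) := by omega
    rw [hjn]
    simp [List.cons_append]

theorem pv_lev_high (b : Nat) (index : List Int) (k t : Nat)
    (ht0 : ∀ i < t, k / 2 ^ i % 2 = 1) (ht1 : k / 2 ^ t % 2 = 0)
    (i : Nat) (hi : t < i) : lev b index (k+1) i = lev b index k i := by
  unfold lev
  rw [pv_succ_div_high k t i ht0 ht1 hi, pv_succ_div_high k t (i+1) ht0 ht1 (by omega)]

theorem pv_levelsFrom_high (b : Nat) (index : List Int) (k t : Nat)
    (ht0 : ∀ i < t, k / 2 ^ i % 2 = 1) (ht1 : k / 2 ^ t % 2 = 0) :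
    ∀ len j, t < j → levelsFrom b index (k+1) j len = levelsFrom b index k j len := by
  intro len
  induction len with
  | zero => intro j _; rfl
  | succ n ih =>
    intro j hj
    rw [levelsFrom, levelsFrom, pv_lev_high b index k t ht0 ht1 j hj, ih (j+1) (by omega)]

theorem pv_lmat_carry (b : Nat) (index : List Int) (hb : 0 < b) (k t : Nat)
    (ht0 : ∀ i < t, k / 2 ^ i % 2 = 1) (ht1 : k / 2 ^ t % 2 = 0)
    (hlen : (k+1) * b ≤ index.length) :
    ∀ len j z0, j ≤ t → k < 2 ^ (j + len) →
      z0.Perm ((index.drop ((k / 2 ^ j) * 2 ^ j * b)).take ((k + 1 - (k / 2 ^ j) * 2 ^ j) * b)) →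
      lmat (levelsFrom b index k j len) z0
        = levelsFrom b index (k+1) j (max len (t + 1 - j)) := by
  intro len
  induction len with
  | zero =>
    intro j z0 hjt hk hperm
    -- the list is exhausted: all bits ≥ j of k are 0, and bits < j are 1, so j = t
    have hj0 : k / 2 ^ j = 0 := Nat.div_eq_of_lt (by simpa using hk)
    have hjt' : j = t := by
      by_contra hne
      have hjlt : j < t := by omega
      have := ht0 j hjlt
      rw [hj0] at this
      omega
    subst hjt'
    have hones := pv_ones_mod k j ht0
    have hkeq : k + 1 = 2 ^ j := by
      have hk' : k < 2 ^ j := by simpa using hk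
      rw [Nat.mod_eq_of_lt hk'] at hones
      have hp : 0 < 2 ^ j := Nat.two_pow_pos j
      omega
    have hmax : max 0 (j + 1 - j) = 1 := by omega
    rw [hmax]
    show lmat [] z0 = levelsFrom b index (k+1) j 1
    rw [levelsFrom, levelsFrom]
    unfold lmat
    congr 1
    -- lev b index (k+1) j = sorted z0
    have hg : (k+1) / 2 ^ j = 1 := by rw [hkeq, Nat.pow_div (le_refl j) (by norm_num), Nat.sub_self, pow_zero]
    have hs : (k+1) / 2 ^ (j+1) = 0 := Nat.div_eq_of_lt (by rw [hkeq]; exact Nat.pow_lt_pow_right (by norm_num) (by omega))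
    unfold lev
    rw [hg, hs]
    simp only [Nat.zero_mul, Nat.one_mod,]
    rw [hj0] at hperm
    simp only [Nat.zero_mul, Nat.sub_zero, List.drop_zero] at hperm
    have htake : (k + 1) * b = 2 ^ j * b := by rw [hkeq]
    rw [htake] at hperm
    rw [pv_sorted_congr z0 _ hperm]
    simp
  | succ len ih =>
    intro j z0 hjt hk hperm
    by_cases hbit : k / 2 ^ j % 2 = 1
    · -- full level: carry
      have hjlt : j < t := by
        by_contra h
        have : j = t := by omega
        rw [this] at hbit; omega
      have ha : k / 2 ^ (j+1) * 2 ^ (j+1) + 2 ^ j = k / 2 ^ j * 2 ^ j := (pv_start_bit1 k j hbit).symm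
      have hmle : k / 2 ^ j * 2 ^ j ≤ k := Nat.div_mul_le_self _ _
      obtain ⟨A, hA⟩ : ∃ A, A = k / 2 ^ (j+1) * 2 ^ (j+1) := ⟨_, rfl⟩
      obtain ⟨B, hB⟩ : ∃ B, B = k / 2 ^ j * 2 ^ j := ⟨_, rfl⟩
      have hpj : 0 < 2 ^ j := Nat.two_pow_pos j
      rw [← hA, ← hB] at ha
      rw [← hB] at hmle
      have hstart : A + 2 ^ j ≤ k + 1 := by clear hA hB; omega
      -- the level is nonempty
      have hlev : lev b index k j ≠ [] := by
        unfold lev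
        rw [if_pos hbit, ← hA]
        apply pv_sorted_ne_nil
        have hp2 : 0 < 2 ^ j := Nat.two_pow_pos j
        have h2 := pv_seg_ne_nil index b A (A + 2 ^ j) hb (by omega)
          (le_trans (Nat.mul_le_mul_right b hstart) hlen)
        have h3 : A + 2 ^ j - A = 2 ^ j := by clear hA hB; omega
        rw [h3] at h2
        exact h2
      rw [levelsFrom]
      show lmat (lev b index k j :: levelsFrom b index k (j+1) len) z0 = _
      unfold lmat
      rw [if_pos hlev]
      -- apply IH
      have hperm' : (lev b index k j ++ z0).Perm
          ((index.drop (A * b)).take ((k + 1 - A) * b)) := by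
        have t1 : A ≤ B := by clear hA hB; omega
        have t2 : B ≤ k + 1 := by clear hA hB; omega
        have hsplit := pv_seg_split index b A B (k+1) t1 t2
        rw [hsplit]
        apply List.Perm.append
        · unfold lev
          rw [if_pos hbit, ← hA]
          have hsp := PySem.List.sorted_perm ((index.drop (A * b)).take (2 ^ j * b)) (fun x : Int => x) false
          have h3 : B - A = 2 ^ j := by clear hA hB; omega
          rw [h3]
          exact hsp
        · rw [← hB] at hperm
          exact hperm
      rw [hA] at hperm'
      rw [ih (j+1) (lev b index k j ++ z0) (by omega) (by
        have hjl : j + (len+1) = (j+1) + len := by omega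
        rw [hjl] at hk; exact hk) hperm']
      -- reassemble the RHS
      have hm1 : max (len+1) (t + 1 - j) = max len (t + 1 - (j+1)) + 1 := by omega
      rw [hm1, levelsFrom]
      congr 1
      -- lev b index (k+1) j = []
      unfold lev
      rw [pv_succ_div_low k t j ht0 (by omega)]
      have : (k / 2 ^ j + 1) % 2 = 0 := by omega
      rw [if_neg (by omega)]
    · -- empty level found: j = t
      have hjt' : j = t := by
        by_contra hne
        have := ht0 j (by omega)
        omega
      subst hjt'
      rw [levelsFrom]
      show lmat (lev b index k j :: levelsFrom b index k (j+1) len) z0 = _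
      have hlevnil : lev b index k j = [] := by unfold lev; rw [if_neg (by omega)]
      unfold lmat
      rw [hlevnil]
      rw [if_neg (by simp)]
      have hm1 : max (len+1) (j + 1 - j) = len + 1 := by omega
      rw [hm1, levelsFrom]
      congr 1
      · -- head: lev b index (k+1) j = sorted z0
        unfold lev
        have hg : (k+1) / 2 ^ j = k / 2 ^ j + 1 := pv_succ_div_low k j j ht0 (le_refl j)
        rw [hg]
        rw [if_pos (by omega)]
        have hstart : (k+1) / 2 ^ (j+1) * 2 ^ (j+1) = k / 2 ^ j * 2 ^ j := by
          rw [pv_succ_div_high k j (j+1) ht0 ht1 (by omega)]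
          exact (pv_start_bit0 k j (by omega)).symm
        rw [hstart]
        have hones := pv_ones_mod k j ht0
        have hdm := Nat.div_add_mod k (2 ^ j)
        have hp : 0 < 2 ^ j := Nat.two_pow_pos j
        have hlen2 : k + 1 - k / 2 ^ j * 2 ^ j = 2 ^ j := by
          obtain ⟨X, hX⟩ : ∃ X, X = 2 ^ j * (k / 2 ^ j) := ⟨_, rfl⟩
          have hX2 : k / 2 ^ j * 2 ^ j = X := by rw [hX]; ring
          rw [← hX] at hdm
          rw [hones] at hdm
          rw [hX2]
          omega
        rw [hlen2] at hperm
        exact pv_sorted_congr z0 _ hperm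
      · -- tail unchanged
        exact (pv_levelsFrom_high b index k j ht0 ht1 len (j+1) (by omega)).symm

theorem pv_exists_t (k : Nat) : ∃ t, (∀ i < t, k / 2 ^ i % 2 = 1) ∧ k / 2 ^ t % 2 = 0 := by
  have hP : ∃ t, k / 2 ^ t % 2 = 0 := ⟨Nat.size k, by rw [Nat.div_eq_of_lt (Nat.lt_size_self k)]⟩
  refine ⟨Nat.find hP, fun i hi => ?_, Nat.find_spec hP⟩
  have hm := Nat.find_min hP hi
  omega

theorem pv_lmGo_inv (index : List Int) (bs : Int) (b : Nat) (hb : bs = (b : Int)) (hbpos : 0 < b) :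
    ∀ fuel c, c + fuel ≤ index.length →
      lmGo index bs fuel (c : Int)
          ((index.drop (c / b * b)).take (c % b))
          (levelsFrom b index (c / b) 0 (max 1 (Nat.size (c / b))))
        = ((index.drop ((c+fuel) / b * b)).take ((c+fuel) % b),
           levelsFrom b index ((c+fuel) / b) 0 (max 1 (Nat.size ((c+fuel) / b)))) := by
  intro fuel
  induction fuel with
  | zero => intro c h; simp [lmGo]
  | succ fuel ih =>
    intro c h
    have hc : c < index.length := by omega
    have hsr : c / b * b + c % b = c := Nat.div_add_mod' c b
    have hcb : c % b < b := Nat.mod_lt _ hbpos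
    unfold lmGo
    simp only [PySem.List.pyGet?_natCast]
    rw [show (index[c]?) = (index[c / b * b + c % b]?) from by rw [hsr]]
    rw [pv_take_snoc index (c / b * b) (c % b) (by omega)]
    have hlz : (((index.drop (c / b * b)).take (c % b + 1)).length : Int) = ((min (c % b + 1) (index.length - c / b * b) : Nat) : Int) := by
      simp [List.length_take, List.length_drop]
    have hmin : min (c % b + 1) (index.length - c / b * b) = c % b + 1 := by omega
    by_cases hfull : c % b + 1 = b
    · -- buffer full: merge
      rw [if_pos (by rw [hlz, hmin, hb]; exact_mod_cast hfull)]
      obtain ⟨t, ht0, ht1⟩ := pv_exists_t (c / b)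
      have hksz : c / b < 2 ^ (0 + max 1 (Nat.size (c / b))) := by
        have h1 : c / b < 2 ^ Nat.size (c / b) := Nat.lt_size_self _
        have h2 : (2:Nat) ^ Nat.size (c / b) ≤ 2 ^ (0 + max 1 (Nat.size (c / b))) :=
          Nat.pow_le_pow_right (by norm_num) (by omega)
        omega
      have hlen : (c / b + 1) * b ≤ index.length := by
        have : (c / b + 1) * b = c / b * b + b := by ring
        omega
      have hperm : ((index.drop (c / b * b)).take (c % b + 1)).Perm
          ((index.drop ((c / b / 2 ^ 0) * 2 ^ 0 * b)).take ((c / b + 1 - (c / b / 2 ^ 0) * 2 ^ 0) * b)) := by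
        simp only [pow_zero, Nat.div_one, mul_one]
        have h1 : c / b + 1 - c / b = 1 := by omega
        rw [h1, one_mul, hfull]
      rw [pv_lmat_carry b index hbpos (c / b) t ht0 ht1 hlen (max 1 (Nat.size (c / b))) 0
        ((index.drop (c / b * b)).take (c % b + 1)) (by omega) hksz hperm]
      have hsz := pv_size_carry (c / b) t ht0 ht1
      have hm0 : t + 1 - 0 = t + 1 := by omega
      rw [hm0, hsz]
      -- recursive call at c+1, with c+1 = (c/b+1)*b
      have hc1 : c + 1 = (c / b + 1) * b := by
        have : (c / b + 1) * b = c / b * b + b := by ring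
        omega
      have hdiv : (c + 1) / b = c / b + 1 := by
        rw [hc1, Nat.mul_div_cancel _ hbpos]
      have hmod : (c + 1) % b = 0 := by
        rw [hc1, Nat.mul_mod_left]
      have hcast : (c : Int) + 1 = ((c + 1 : Nat) : Int) := by push_cast; ring
      rw [hcast]
      have hnil : ([] : List Int) = (index.drop ((c+1) / b * b)).take ((c+1) % b) := by
        rw [hmod]; simp
      rw [hnil, ← hdiv]
      rw [ih (c + 1) (by omega)]
      have harr : c + 1 + fuel = c + (fuel + 1) := by omega
      rw [harr]
    · -- buffer not full
      rw [if_neg (by rw [hlz, hmin, hb]; intro hcon; exact hfull (by exact_mod_cast hcon))]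
      have hdm := Nat.div_add_mod c b
      obtain ⟨hdiv, hmod⟩ := (@Nat.div_mod_unique b (c+1) (c/b) (c%b+1) hbpos).mpr
        ⟨by omega, by omega⟩
      have hcast : (c : Int) + 1 = ((c + 1 : Nat) : Int) := by push_cast; ring
      rw [hcast]
      have htk : (index.drop (c / b * b)).take (c % b + 1)
          = (index.drop ((c+1) / b * b)).take ((c+1) % b) := by
        rw [hdiv, hmod]
      rw [htk, ← hdiv, ih (c + 1) (by omega)]
      have harr : c + 1 + fuel = c + (fuel + 1) := by omega
      rw [harr]

theorem pv_lmBuild_eq (index : List Int) (bs : Int) (b : Nat) (hb : bs = (b : Int)) (m : Nat) :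
    ∀ len c, c = m / 2 ^ len * 2 ^ len →
      lmBuild index bs m len ((c * b : Nat) : Int)
        = (levelsFrom b index m 0 len, ((m * b : Nat) : Int)) := by
  intro len
  induction len with
  | zero =>
    intro c hc
    simp only [pow_zero, Nat.div_one, mul_one] at hc
    subst hc
    rfl
  | succ len ih =>
    intro c hc
    have hbit : ((m >>> len) &&& 1 = 1) ↔ (m / 2 ^ len % 2 = 1) := by
      rw [Nat.shiftRight_eq_div_pow, Nat.and_one_is_mod]
    unfold lmBuild
    by_cases hset : m / 2 ^ len % 2 = 1
    · rw [if_pos (hbit.mpr hset)]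
      dsimp only
      have hstep := pv_start_bit1 m len hset
      have hc' : c + 2 ^ len = m / 2 ^ len * 2 ^ len := by omega
      have hpos : ((c * b : Nat) : Int) + 2 ^ len * bs = (((c + 2 ^ len) * b : Nat) : Int) := by
        rw [hb]; push_cast; ring
      rw [hpos, ih (c + 2 ^ len) (by omega)]
      rw [levelsFrom_snoc b index m len 0]
      simp only [Nat.zero_add]
      congr 2
      · -- the produced level = lev b index m len
        unfold lev
        rw [if_pos hset]
        rw [PySem.List.slice_natCast]
        have harith : (c + 2 ^ len) * b - c * b = 2 ^ len * b := by
          have hx : (c + 2 ^ len) * b = c * b + 2 ^ len * b := by ring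
          omega
        rw [harith, ← hc]
    · rw [if_neg (fun hcon => hset (hbit.mp hcon))]
      dsimp only
      have hstep := pv_start_bit0 m len (by omega)
      have hc' : c = m / 2 ^ len * 2 ^ len := by omega
      rw [ih c hc']
      rw [levelsFrom_snoc b index m len 0]
      simp only [Nat.zero_add]
      rw [show lev b index m len = [] from by unfold lev; rw [if_neg (by omega)]]

theorem pv_lmGo_nomerge (index : List Int) (bs : Int) (hbs : bs ≤ 0) :
    ∀ fuel c z0 L, c + fuel ≤ index.length →
      lmGo index bs fuel (c : Int) z0 L = (z0 ++ (index.drop c).take fuel, L) := by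
  intro fuel
  induction fuel with
  | zero => intro c z0 L h; simp [lmGo]
  | succ fuel ih =>
    intro c z0 L h
    unfold lmGo
    simp only [PySem.List.pyGet?_natCast]
    rw [if_neg (by
      have hl : ((z0 ++ [index[c]?.getD 0]).length : Int) = (z0.length : Int) + 1 := by simp
      omega)]
    have hcast : (c : Int) + 1 = ((c + 1 : Nat) : Int) := by push_cast; ring
    rw [hcast, ih (c + 1) _ L (by omega)]
    have hdr : index.drop c = index[c] :: index.drop (c + 1) := by
      rw [List.drop_eq_getElem_cons (by omega)]
    have hget : index[c]?.getD 0 = index[c] := by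
      rw [List.getElem?_eq_getElem (by omega)]
      rfl
    rw [hget, hdr, List.take_succ_cons, List.append_assoc]
    rfl

theorem pv_main (index : List Int) (cut_off : Int) (buffer_size : Int)
    (hpre : cut_off ≤ (index.length : Int)) :
    Logarithmic_merge index cut_off buffer_size = Logarithmic_merge_alt index cut_off buffer_size := by
  unfold Logarithmic_merge Logarithmic_merge_alt
  dsimp only
  have hnnlen : cut_off.toNat ≤ index.length := by omega
  have hmax : max cut_off 0 = ((cut_off.toNat : Nat) : Int) := by omega
  by_cases hbs : 0 < buffer_size
  · have hb : buffer_size = ((buffer_size.toNat : Nat) : Int) := by omega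
    have hbpos : 0 < buffer_size.toNat := by omega
    set nn := cut_off.toNat
    set b := buffer_size.toNat
    -- A side: run the invariant from the initial state
    have hA := pv_lmGo_inv index buffer_size b hb hbpos nn 0 (by omega)
    have hinit1 : ((index.drop (0 / b * b)).take (0 % b)) = ([] : List Int) := by
      simp
    have hinit2 : levelsFrom b index (0 / b) 0 (max 1 (Nat.size (0 / b))) = [[]] := by
      norm_num [levelsFrom, lev]
    rw [hinit1, hinit2] at hA
    norm_num at hA
    rw [hA]
    -- B side
    have hm : (PySem.Int.floordiv (max cut_off 0) buffer_size).toNat = nn / b := by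
      rw [hmax, hb, PySem.Int.floordiv_natCast, Int.toNat_natCast]
    rw [if_pos hbs, hm]
    have hmlt : nn / b < 2 ^ max 1 (Nat.size (nn / b)) := by
      have h1 : nn / b < 2 ^ Nat.size (nn / b) := Nat.lt_size_self _
      have h2 : (2:Nat) ^ Nat.size (nn / b) ≤ 2 ^ max 1 (Nat.size (nn / b)) :=
        Nat.pow_le_pow_right (by norm_num) (by omega)
      omega
    have hB := pv_lmBuild_eq index buffer_size b hb (nn / b) (max 1 (Nat.size (nn / b))) 0
      (by rw [Nat.div_eq_of_lt hmlt, Nat.zero_mul])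
    simp only [Nat.zero_mul, Nat.cast_zero] at hB
    rw [hB]
    -- final slice = leftover buffer
    have hdm := Nat.div_add_mod nn b
    have hslice : PySem.List.slice index (some ((nn / b * b : Nat) : Int)) (some (max cut_off 0))
        = (index.drop (nn / b * b)).take (nn % b) := by
      rw [hmax, PySem.List.slice_natCast]
      congr 1
      obtain ⟨X, hX⟩ : ∃ X, X = nn / b * b := ⟨_, rfl⟩
      have hX2 : b * (nn / b) = X := by rw [hX]; ring
      rw [hX2] at hdm
      rw [← hX]
      omega
    rw [hslice]
  · -- buffer_size ≤ 0: no merge ever happens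
    have hbs' : buffer_size ≤ 0 := by omega
    have hA := pv_lmGo_nomerge index buffer_size hbs' cut_off.toNat 0 [] [[]] (by omega)
    norm_num at hA
    rw [hA]
    rw [if_neg hbs]
    have hBuild : lmBuild index buffer_size 0 (max 1 (Nat.size 0)) 0 = ([[]], 0) := by
      norm_num [Nat.size_zero, lmBuild]
    rw [hBuild]
    have hslice : PySem.List.slice index (some (0 : Int)) (some (max cut_off 0))
        = index.take cut_off.toNat := by
      rw [hmax, PySem.List.slice_zero_start, PySem.List.slice_to_natCast]
    rw [hslice]

-- ===== VERDICT (by name: the statement is the Claim_ definition above) =====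
theorem Logarithmic_merge_spec : Claim_equal_Logarithmic_merge := by
  intro index cut_off buffer_size _ hpre
  unfold Spec_Logarithmic_merge
  exact pv_main index cut_off buffer_size hpre

@[simp] theorem Logarithmic_merge_raises : Claim_raises_Logarithmic_merge := by
  unfold Claim_raises_Logarithmic_merge
  exact ⟨fun index cut_off buffer_size _ hr hp => absurd hp
    (by unfold Pre_Logarithmic_merge; unfold Raises_Logarithmic_merge at hr; omega), by decide⟩
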